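-- pv_equiv track=rewrite | github.com/Melania227/4InLine | 4ENLINEA - Morales Melania.py | cuantasFichasSeguidas
-- ===== SOURCE A (Python) =====
-- def cuantasFichasSeguidas(matriz):
--     res = []
--     columna = []
--     for i in range(0, len(matriz[0])):
--         for j in range(0, len(matriz)):
--             columna = columna + [matriz[j][i]]
--         res += [cuantasFichasSeguidas_aux(columna)]
--         columna = []
--     return res
--
-- def cuantasFichasSeguidas_aux(columna):
--     valorAcumulado = 0
--     i = 0
--     while columna[i] == 0 and i < len(columna) - 1:
--         i += 1
--     ficha = columna[i]
--     while columna[i] == ficha and i < len(columna) - 1: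
--         i += 1
--         valorAcumulado += 1
--
--     if columna[i] == ficha and columna[i] != 0:
--         ficha = columna[i]
--         valorAcumulado += 1
--
--     return [valorAcumulado, ficha]
-- ===== SOURCE B (Python) =====
-- def paso(s, v):
--     c, f, d = s
--     if d:
--         return s
--     if f == 0:
--         return (1, v, False) if v != 0 else s
--     if v == f:
--         return (c + 1, f, False)
--     return (c, f, True)
--
-- def cuantasFichasSeguidas(matriz):
--     n = len(matriz[0])
--     m = len(matriz)
--     state = [(0, 0, False)] * n
--     for j in range(m):
--         state = [paso(state[i], matriz[j][i]) for i in range(n)]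
--     return [[c, f] for (c, f, d) in state]
-- ===== Notes on version B (the rewrite author's own statement) =====
-- stated objective: faster
-- what changed: Instead of materializing each column (via repeated list concatenation) and running the aux's while-loops, B makes a single row-major pass keeping one small finite-state machine (count, token, done) per column and never builds column lists.
-- outside the precondition, e.g. on cuantasFichasSeguidas([]): A raises IndexError, B raises IndexError; on cuantasFichasSeguidas([[1, 2], [3]]): A raises IndexError, B raises IndexError
import Mathlib
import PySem

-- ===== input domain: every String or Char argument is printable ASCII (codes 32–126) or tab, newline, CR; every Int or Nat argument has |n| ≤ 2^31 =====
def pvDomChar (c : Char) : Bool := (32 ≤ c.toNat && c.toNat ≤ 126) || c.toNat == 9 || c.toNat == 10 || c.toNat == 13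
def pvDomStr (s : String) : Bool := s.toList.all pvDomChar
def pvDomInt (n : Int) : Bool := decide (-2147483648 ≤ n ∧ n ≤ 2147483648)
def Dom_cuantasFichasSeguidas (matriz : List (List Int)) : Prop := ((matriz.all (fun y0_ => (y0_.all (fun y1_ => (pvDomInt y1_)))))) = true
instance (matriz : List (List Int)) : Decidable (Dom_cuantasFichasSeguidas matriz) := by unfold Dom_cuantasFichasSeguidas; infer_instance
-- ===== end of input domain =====

-- B drops A's column materialisation + two-while aux: one row-major pass keeping a
-- (count, token, done) state machine per column — asymptotically faster (A rebuilds each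
-- column by repeated list concatenation).

-- ===== PORT A =====
-- `while columna[i] == 0 and i < len(columna) - 1: i += 1`
-- (indices stay in range on every admitted input, so pyGetD is exact here)
def auxSkipA (col : List Int) (i : Nat) : Nat :=
  if h : PySem.List.pyGetD col (i : Int) 0 = 0 ∧ i < col.length - 1 then
    auxSkipA col (i + 1)
  else i
termination_by col.length - i
decreasing_by omega

-- `while columna[i] == ficha and i < len(columna) - 1: i += 1; valorAcumulado += 1`
def auxCountA (col : List Int) (ficha : Int) (i : Nat) (acc : Int) : Nat × Int :=
  if h : PySem.List.pyGetD col (i : Int) 0 = ficha ∧ i < col.length - 1 then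
    auxCountA col ficha (i + 1) (acc + 1)
  else (i, acc)
termination_by col.length - i
decreasing_by omega

def cuantasFichasSeguidas_aux (col : List Int) : List Int :=
  let i := auxSkipA col 0
  let ficha := PySem.List.pyGetD col (i : Int) 0
  let p := auxCountA col ficha i 0
  if PySem.List.pyGetD col (p.1 : Int) 0 = ficha ∧ PySem.List.pyGetD col (p.1 : Int) 0 ≠ 0 then
    [p.2 + 1, ficha]
  else
    [p.2, ficha]

def cuantasFichasSeguidas (matriz : List (List Int)) : List (List Int) :=
  (PySem.List.pyRange 0 ((PySem.List.pyGetD matriz 0 []).length : Int) 1).foldl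
    (fun res i =>
      let columna := (PySem.List.pyRange 0 (matriz.length : Int) 1).foldl
        (fun c j => c ++ [PySem.List.pyGetD (PySem.List.pyGetD matriz j []) i 0]) []
      res ++ [cuantasFichasSeguidas_aux columna]) []

-- ===== PORT B =====
-- per-column state machine (count, token, done); `paso` is Source B's paso, step for step
def paso (s : Int × Int × Bool) (v : Int) : Int × Int × Bool :=
  if s.2.2 then s
  else if s.2.1 = 0 then (if v ≠ 0 then (1, v, false) else s)
  else if v = s.2.1 then (s.1 + 1, s.2.1, false)
  else (s.1, s.2.1, true)

-- `state = [paso(state[i], matriz[j][i]) for i in range(n)]` for j in range(m)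
-- (state[i] is always in range, so pyGetD's default is never used)
def cuantasFichasSeguidas_alt (matriz : List (List Int)) : List (List Int) :=
  let n := (PySem.List.pyGetD matriz 0 []).length
  let m := matriz.length
  let state := (PySem.List.pyRange 0 (m : Int) 1).foldl
    (fun st j => (PySem.List.pyRange 0 (n : Int) 1).map
      (fun i => paso (PySem.List.pyGetD st i (0, 0, false))
        (PySem.List.pyGetD (PySem.List.pyGetD matriz j []) i 0)))
    (List.replicate n ((0 : Int), (0 : Int), false))
  state.map (fun s => [s.1, s.2.1])

-- ===== PRECONDITION & SPEC =====
-- Pre_ excludes exactly the inputs where A raises IndexError: the empty matrix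
-- (matriz[0]) and ragged matrices with some row shorter than the first row (matriz[j][i]).
def Pre_cuantasFichasSeguidas (matriz : List (List Int)) : Prop :=
  matriz ≠ [] ∧ ∀ row ∈ matriz, (matriz.headD []).length ≤ row.length
instance (matriz : List (List Int)) : Decidable (Pre_cuantasFichasSeguidas matriz) := by
  unfold Pre_cuantasFichasSeguidas; infer_instance

def pvWitness_cuantasFichasSeguidas : List (List Int) := [[1, 0], [1, 2], [0, 2]]

def Spec_cuantasFichasSeguidas (matriz : List (List Int)) (out : List (List Int)) : Prop := out = cuantasFichasSeguidas_alt matriz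
instance (matriz : List (List Int)) (out : List (List Int)) : Decidable (Spec_cuantasFichasSeguidas matriz out) := by unfold Spec_cuantasFichasSeguidas; infer_instance

-- ===== CLAIM (what is proved, stated in full; the proofs are below) =====
def Claim_equal_cuantasFichasSeguidas : Prop := ∀ (matriz : List (List Int)), Dom_cuantasFichasSeguidas matriz → Pre_cuantasFichasSeguidas matriz → Spec_cuantasFichasSeguidas matriz (cuantasFichasSeguidas matriz)

-- ===== LEMMAS AND PROOFS =====

-- proof-side reference machine: skip index, run count, and their streak characterisation
def bSkip (col : List Int) (k : Nat) : Nat :=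
  if h : k < col.length ∧ col.getD k 0 = 0 then bSkip col (k + 1) else k
termination_by col.length - k
decreasing_by omega

def bCount (col : List Int) (ficha : Int) (k : Nat) (c : Int) : Int :=
  if h : k < col.length ∧ col.getD k 0 = ficha then bCount col ficha (k + 1) (c + 1) else c
termination_by col.length - k
decreasing_by omega

def colStreak (col : List Int) : List Int :=
  let k := bSkip col 0
  if k = col.length then [0, 0]
  else
    let ficha := col.getD k 0
    [bCount col ficha k 0, ficha]

def countEq (f : Int) : List Int → Int
  | [] => 0
  | w :: t => if w = f then countEq f t + 1 else 0

def streak2 : List Int → Int × Int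
  | [] => (0, 0)
  | v :: t => if v = 0 then streak2 t else (countEq v t + 1, v)

theorem auxSkipA_eq_min (col : List Int) (i : Nat) (hi : i < col.length) :
    auxSkipA col i = min (bSkip col i) (col.length - 1) := by
  have key : ∀ (n j : Nat), col.length - j ≤ n → j < col.length →
      auxSkipA col j = min (bSkip col j) (col.length - 1) := by
    intro n
    induction n with
    | zero => intro j h hj; omega
    | succ n ih =>
      intro j h hj
      rw [auxSkipA.eq_def, bSkip.eq_def]
      simp only [PySem.List.pyGetD_natCast]
      by_cases h0 : col.getD j 0 = 0
      · by_cases hlast : j < col.length - 1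
        · rw [dif_pos ⟨h0, hlast⟩, dif_pos ⟨by omega, h0⟩]
          exact ih (j + 1) (by omega) (by omega)
        · rw [dif_neg (by tauto), dif_pos ⟨hj, h0⟩, bSkip.eq_def,
            dif_neg (by rintro ⟨h1, _⟩; omega)]
          omega
      · rw [dif_neg (by tauto), dif_neg (by tauto)]
        omega
  exact key (col.length - i) i le_rfl hi

theorem bSkip_le_len (col : List Int) (i : Nat) (hi : i ≤ col.length) :
    bSkip col i ≤ col.length := by
  have key : ∀ (n j : Nat), col.length - j ≤ n → j ≤ col.length →
      bSkip col j ≤ col.length := by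
    intro n
    induction n with
    | zero =>
      intro j h hj
      rw [bSkip.eq_def, dif_neg (by rintro ⟨h1, _⟩; omega)]
      omega
    | succ n ih =>
      intro j h hj
      rw [bSkip.eq_def]
      split_ifs with hc
      · exact ih (j + 1) (by omega) (by omega)
      · exact hj
  exact key (col.length - i) i le_rfl hi

theorem bSkip_all_zero (col : List Int) (i : Nat) (h : bSkip col i = col.length) :
    ∀ j, i ≤ j → j < col.length → col.getD j 0 = 0 := by
  have key : ∀ (n k : Nat), col.length - k ≤ n → bSkip col k = col.length →
      ∀ j, k ≤ j → j < col.length → col.getD j 0 = 0 := by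
    intro n
    induction n with
    | zero =>
      intro k hn hk j hkj hjl
      rw [bSkip.eq_def, dif_neg (by rintro ⟨h1, _⟩; omega)] at hk
      exfalso; omega
    | succ n ih =>
      intro k hn hk j hkj hjl
      rw [bSkip.eq_def] at hk
      split_ifs at hk with hc
      · rcases Nat.eq_or_lt_of_le hkj with heq | hlt
        · exact heq ▸ hc.2
        · exact ih (k + 1) (by omega) hk j (by omega) hjl
      · exfalso
        omega
  exact key (col.length - i) i le_rfl h

theorem bSkip_hit (col : List Int) (i : Nat) (h : bSkip col i < col.length) :
    col.getD (bSkip col i) 0 ≠ 0 := by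
  have key : ∀ (n k : Nat), col.length - k ≤ n → bSkip col k < col.length →
      col.getD (bSkip col k) 0 ≠ 0 := by
    intro n
    induction n with
    | zero =>
      intro k hn hk
      rw [bSkip.eq_def, dif_neg (by rintro ⟨h1, _⟩; omega)] at hk ⊢
      exfalso; omega
    | succ n ih =>
      intro k hn hk
      rw [bSkip.eq_def] at hk ⊢
      split_ifs at hk ⊢ with hc
      · exact ih (k + 1) (by omega) hk
      · intro h0
        exact hc ⟨hk, h0⟩
  exact key (col.length - i) i le_rfl h

theorem countA_eq_bCount (col : List Int) (ficha : Int) (hf : ficha ≠ 0) (i : Nat) (acc : Int)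
    (hi : i < col.length) :
    (if col.getD (auxCountA col ficha i acc).1 0 = ficha ∧
        col.getD (auxCountA col ficha i acc).1 0 ≠ 0 then
      (auxCountA col ficha i acc).2 + 1
    else (auxCountA col ficha i acc).2) = bCount col ficha i acc := by
  have key : ∀ (n j : Nat) (a : Int), col.length - j ≤ n → j < col.length →
      (if col.getD (auxCountA col ficha j a).1 0 = ficha ∧
          col.getD (auxCountA col ficha j a).1 0 ≠ 0 then
        (auxCountA col ficha j a).2 + 1
      else (auxCountA col ficha j a).2) = bCount col ficha j a := by
    intro n
    induction n with
    | zero => intro j a h hj; omega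
    | succ n ih =>
      intro j a h hj
      by_cases hcf : col.getD j 0 = ficha
      · by_cases hlast : j < col.length - 1
        · rw [auxCountA.eq_def]
          simp only [PySem.List.pyGetD_natCast]
          rw [dif_pos ⟨hcf, hlast⟩, bCount.eq_def, dif_pos ⟨hj, hcf⟩]
          exact ih (j + 1) (a + 1) (by omega) (by omega)
        · have hp : auxCountA col ficha j a = (j, a) := by
            rw [auxCountA.eq_def]
            simp only [PySem.List.pyGetD_natCast]
            rw [dif_neg (by tauto)]
          rw [hp]
          simp only
          rw [if_pos ⟨hcf, by rw [hcf]; exact hf⟩, bCount.eq_def, dif_pos ⟨hj, hcf⟩,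
            bCount.eq_def, dif_neg (by rintro ⟨h1, _⟩; omega)]
      · have hp : auxCountA col ficha j a = (j, a) := by
          rw [auxCountA.eq_def]
          simp only [PySem.List.pyGetD_natCast]
          rw [dif_neg (by tauto)]
        rw [hp]
        simp only
        rw [if_neg (by rintro ⟨h1, _⟩; exact hcf h1), bCount.eq_def,
          dif_neg (by rintro ⟨_, h2⟩; exact hcf h2)]
  exact key (col.length - i) i acc le_rfl hi

theorem aux_eq_colStreak (col : List Int) (hc : col ≠ []) :
    cuantasFichasSeguidas_aux col = colStreak col := by
  have hlen : 0 < col.length := List.length_pos_of_ne_nil hc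
  have hk0 : auxSkipA col 0 = min (bSkip col 0) (col.length - 1) := auxSkipA_eq_min col 0 hlen
  unfold cuantasFichasSeguidas_aux colStreak
  simp only [PySem.List.pyGetD_natCast]
  by_cases hcase : bSkip col 0 = col.length
  · have hz : col.getD (col.length - 1) 0 = 0 :=
      bSkip_all_zero col 0 hcase (col.length - 1) (Nat.zero_le _) (by omega)
    have hmin : auxSkipA col 0 = col.length - 1 := by omega
    rw [hmin, hz]
    have hcnt : auxCountA col 0 (col.length - 1) 0 = (col.length - 1, 0) := by
      rw [auxCountA.eq_def]
      simp only [PySem.List.pyGetD_natCast]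
      rw [dif_neg (by rintro ⟨_, h2⟩; omega)]
    rw [hcnt]
    simp only
    rw [if_neg (by rintro ⟨_, h2⟩; exact h2 hz), if_pos hcase]
  · have hklt : bSkip col 0 < col.length :=
      lt_of_le_of_ne (bSkip_le_len col 0 (Nat.zero_le _)) hcase
    have hmin : auxSkipA col 0 = bSkip col 0 := by omega
    have hficha : col.getD (bSkip col 0) 0 ≠ 0 := bSkip_hit col 0 hklt
    rw [hmin, if_neg hcase]
    have hcount := countA_eq_bCount col (col.getD (bSkip col 0) 0) hficha (bSkip col 0) 0 hklt
    split_ifs with hcond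
    · rw [if_pos hcond] at hcount
      rw [hcount]
    · rw [if_neg hcond] at hcount
      rw [hcount]

-- shift lemmas for the reference machine
theorem bSkip_cons_succ (w : Int) (t : List Int) (k : Nat) :
    bSkip (w :: t) (k + 1) = bSkip t k + 1 := by
  have key : ∀ (n k : Nat), t.length - k ≤ n → bSkip (w :: t) (k + 1) = bSkip t k + 1 := by
    intro n
    induction n with
    | zero =>
      intro k hn
      conv_lhs => rw [bSkip.eq_def]
      conv_rhs => rw [bSkip.eq_def]
      rw [dif_neg (by rintro ⟨h1, _⟩; simp only [List.length_cons] at h1; omega),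
        dif_neg (by rintro ⟨h1, _⟩; omega)]
    | succ n ih =>
      intro k hn
      conv_lhs => rw [bSkip.eq_def]
      conv_rhs => rw [bSkip.eq_def]
      by_cases hc : k < t.length ∧ t.getD k 0 = 0
      · rw [dif_pos ⟨by simp only [List.length_cons]; omega, by
            rw [List.getD_cons_succ]; exact hc.2⟩, dif_pos hc]
        exact ih (k + 1) (by omega)
      · rw [dif_neg (by
            rintro ⟨h1, h2⟩
            rw [List.getD_cons_succ] at h2
            simp only [List.length_cons] at h1
            exact hc ⟨by omega, h2⟩), dif_neg hc]
  exact key (t.length - k) k le_rfl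

theorem bCount_cons_succ (w : Int) (t : List Int) (f : Int) (k : Nat) (c : Int) :
    bCount (w :: t) f (k + 1) c = bCount t f k c := by
  have key : ∀ (n k : Nat) (c : Int), t.length - k ≤ n →
      bCount (w :: t) f (k + 1) c = bCount t f k c := by
    intro n
    induction n with
    | zero =>
      intro k c hn
      conv_lhs => rw [bCount.eq_def]
      conv_rhs => rw [bCount.eq_def]
      rw [dif_neg (by rintro ⟨h1, _⟩; simp only [List.length_cons] at h1; omega),
        dif_neg (by rintro ⟨h1, _⟩; omega)]
    | succ n ih =>
      intro k c hn
      conv_lhs => rw [bCount.eq_def]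
      conv_rhs => rw [bCount.eq_def]
      by_cases hc : k < t.length ∧ t.getD k 0 = f
      · rw [dif_pos ⟨by simp only [List.length_cons]; omega, by
            rw [List.getD_cons_succ]; exact hc.2⟩, dif_pos hc]
        exact ih (k + 1) (c + 1) (by omega)
      · rw [dif_neg (by
            rintro ⟨h1, h2⟩
            rw [List.getD_cons_succ] at h2
            simp only [List.length_cons] at h1
            exact hc ⟨by omega, h2⟩), dif_neg hc]
  exact key (t.length - k) k c le_rfl

theorem bCount_zero_eq_countEq (f : Int) (t : List Int) : ∀ (c : Int),
    bCount t f 0 c = countEq f t + c := by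
  induction t with
  | nil =>
    intro c
    rw [bCount.eq_def, dif_neg (by rintro ⟨h1, _⟩; simp at h1)]
    simp [countEq]
  | cons w t ih =>
    intro c
    rw [bCount.eq_def]
    simp only [List.length_cons, List.getD_cons_zero]
    by_cases hw : w = f
    · rw [dif_pos ⟨by omega, hw⟩, bCount_cons_succ, ih (c + 1)]
      simp [countEq, hw]
      ring
    · rw [dif_neg (by rintro ⟨_, h2⟩; exact hw h2)]
      simp [countEq, hw]
  
theorem colStreak_cons_zero (t : List Int) :
    colStreak ((0 : Int) :: t) = colStreak t := by
  have hsk : bSkip ((0 : Int) :: t) 0 = bSkip t 0 + 1 := by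
    rw [bSkip.eq_def, dif_pos ⟨by simp, by simp⟩]
    exact bSkip_cons_succ 0 t 0
  unfold colStreak
  rw [hsk]
  simp only [List.length_cons, List.getD_cons_succ, bCount_cons_succ]
  by_cases hc : bSkip t 0 = t.length
  · rw [if_pos (by omega), if_pos hc]
  · rw [if_neg (by omega), if_neg hc]

theorem colStreak_eq_streak2 (l : List Int) (hl : l ≠ []) :
    colStreak l = [(streak2 l).1, (streak2 l).2] := by
  induction l with
  | nil => exact absurd rfl hl
  | cons v t ih =>
    by_cases hv : v = 0
    · subst hv
      by_cases ht : t = []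
      · subst ht
        have h1 : bSkip [(0 : Int)] 0 = 1 := by
          rw [bSkip.eq_def, dif_pos ⟨by simp, by simp⟩, bSkip.eq_def,
            dif_neg (by rintro ⟨h1, _⟩; simp at h1)]
        unfold colStreak
        rw [h1]
        simp [streak2]
      · rw [colStreak_cons_zero t, ih ht]
        simp [streak2]
    · have hsk : bSkip (v :: t) 0 = 0 := by
        rw [bSkip.eq_def, dif_neg (by rintro ⟨_, h2⟩; simp at h2; exact hv h2)]
      unfold colStreak
      rw [hsk]
      have hlen : (v :: t).length ≠ 0 := by simp
      rw [if_neg (by omega)]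
      simp only [List.getD_cons_zero]
      have hb : bCount (v :: t) v 0 0 = countEq v t + 1 := by
        rw [bCount.eq_def, dif_pos ⟨by simp, by simp⟩, bCount_cons_succ,
          bCount_zero_eq_countEq]
        norm_num
      rw [hb]
      simp [streak2, hv]

-- the per-column state machine computes streak2
theorem foldl_paso_done (l : List Int) (c f : Int) :
    l.foldl paso (c, f, true) = (c, f, true) := by
  induction l with
  | nil => rfl
  | cons w t ih =>
    rw [List.foldl_cons]
    have : paso (c, f, true) w = (c, f, true) := by simp [paso]
    rw [this, ih]

theorem foldl_paso_run (f : Int) (hf : f ≠ 0) : ∀ (l : List Int) (c : Int),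
    ∃ d, l.foldl paso (c, f, false) = (c + countEq f l, f, d) := by
  intro l
  induction l with
  | nil => intro c; exact ⟨false, by simp [countEq]⟩
  | cons w t ih =>
    intro c
    rw [List.foldl_cons]
    by_cases hw : w = f
    · have hp : paso (c, f, false) w = (c + 1, f, false) := by
        simp [paso, hf, hw]
      rw [hp]
      obtain ⟨d, hd⟩ := ih (c + 1)
      refine ⟨d, ?_⟩
      rw [hd]
      simp [countEq, hw]
      ring
    · have hp : paso (c, f, false) w = (c, f, true) := by
        simp [paso, hf, hw]
      rw [hp, foldl_paso_done]
      exact ⟨true, by simp [countEq, hw]⟩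

theorem foldl_paso_fresh (l : List Int) :
    (l.foldl paso ((0 : Int), (0 : Int), false)).1 = (streak2 l).1 ∧
    (l.foldl paso ((0 : Int), (0 : Int), false)).2.1 = (streak2 l).2 := by
  induction l with
  | nil => simp [streak2]
  | cons v t ih =>
    rw [List.foldl_cons]
    by_cases hv : v = 0
    · have hp : paso ((0 : Int), (0 : Int), false) v = ((0 : Int), (0 : Int), false) := by
        simp [paso, hv]
      rw [hp]
      simpa [streak2, hv] using ih
    · have hp : paso ((0 : Int), (0 : Int), false) v = ((1 : Int), v, false) := by
        simp [paso, hv]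
      rw [hp]
      obtain ⟨d, hd⟩ := foldl_paso_run v hv t 1
      rw [hd]
      simp [streak2, hv]
      omega

-- the row-major fold over per-column states equals independent per-column folds
theorem rowfold (mtx : List (List Int)) (n : Nat) (js : List Int) :
    ∀ (g : Int → Int × Int × Bool),
    js.foldl
      (fun st j => (PySem.List.pyRange 0 (n : Int) 1).map
        (fun i => paso (PySem.List.pyGetD st i (0, 0, false))
          (PySem.List.pyGetD (PySem.List.pyGetD mtx j []) i 0)))
      ((PySem.List.pyRange 0 (n : Int) 1).map g)
    = (PySem.List.pyRange 0 (n : Int) 1).map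
        (fun i => js.foldl
          (fun s j => paso s (PySem.List.pyGetD (PySem.List.pyGetD mtx j []) i 0)) (g i)) := by
  induction js with
  | nil => intro g; simp
  | cons j js ih =>
    intro g
    rw [List.foldl_cons]
    have h1 : (PySem.List.pyRange 0 (n : Int) 1).map
        (fun i => paso (PySem.List.pyGetD ((PySem.List.pyRange 0 (n : Int) 1).map g) i (0, 0, false))
          (PySem.List.pyGetD (PySem.List.pyGetD mtx j []) i 0))
        = (PySem.List.pyRange 0 (n : Int) 1).map
          (fun i => paso (g i) (PySem.List.pyGetD (PySem.List.pyGetD mtx j []) i 0)) := by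
      apply List.map_congr_left
      intro i hi
      rw [PySem.List.mem_pyRange_one] at hi
      rw [PySem.List.pyGetD_map_pyRange_of_nonneg _ _ _ _ hi.1 hi.2]
    rw [h1, ih]
    simp only [List.foldl_cons]

-- ===== VERDICT (by name: the statement is the Claim_ definition above) =====
theorem cuantasFichasSeguidas_spec : Claim_equal_cuantasFichasSeguidas := by
  intro matriz hdom hpre
  obtain ⟨hne, _⟩ := hpre
  have hm : 0 < matriz.length := List.length_pos_of_ne_nil hne
  unfold Spec_cuantasFichasSeguidas
  unfold cuantasFichasSeguidas cuantasFichasSeguidas_alt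
  simp only [PySem.List.foldl_append_singleton_eq_map, List.nil_append]
  have hrepl : List.replicate (PySem.List.pyGetD matriz 0 []).length ((0 : Int), (0 : Int), false)
      = (PySem.List.pyRange 0 ((PySem.List.pyGetD matriz 0 []).length : Int) 1).map
          (fun _ => ((0 : Int), (0 : Int), false)) := by
    rw [List.map_const', PySem.List.length_pyRange_one]
    simp
  rw [hrepl, rowfold, List.map_map]
  apply List.map_congr_left
  intro i hi
  simp only [Function.comp]
  set col := (PySem.List.pyRange 0 (matriz.length : Int) 1).map
    (fun j => PySem.List.pyGetD (PySem.List.pyGetD matriz j []) i 0) with hcol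
  have hfold : (PySem.List.pyRange 0 (matriz.length : Int) 1).foldl
      (fun s j => paso s (PySem.List.pyGetD (PySem.List.pyGetD matriz j []) i 0))
      ((0 : Int), (0 : Int), false)
      = col.foldl paso ((0 : Int), (0 : Int), false) := by
    rw [hcol, List.foldl_map]
  rw [hfold]
  have hcne : col ≠ [] := by
    intro h
    have : col.length = 0 := by rw [h]; rfl
    rw [hcol, List.length_map, PySem.List.length_pyRange_one] at this
    omega
  rw [aux_eq_colStreak col hcne, colStreak_eq_streak2 col hcne]
  obtain ⟨h1, h2⟩ := foldl_paso_fresh col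
  rw [h1, h2]
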